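-- pv_equiv track=rewrite | github.com/zzy50/test | 01_image_related_script/crop_img.py | get_inter
-- ===== SOURCE A (Python) =====
-- def get_inter(img_list: list, txt_list: list):
--
--     img_stem = []
--     for img in img_list:
--         spl = img.split(".")
--         img_stem.append(spl[0][-8:])
--     txt_stem = []
--     for txt in txt_list:
--         spl = txt.split(".")
--         txt_stem.append(spl[0][-8:])
--     sym = set(img_stem) & set(txt_stem)
--     sym = sorted(sym)
--     return sym
-- ===== SOURCE B (Python) =====
-- def get_inter(img_list: list, txt_list: list):
--     a = sorted(s.split(".")[0][-8:] for s in img_list)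
--     b = sorted(s.split(".")[0][-8:] for s in txt_list)
--     out = []
--     i = j = 0
--     n, m = len(a), len(b)
--     while i < n and j < m:
--         if a[i] < b[j]:
--             i += 1
--         elif b[j] < a[i]:
--             j += 1
--         else:
--             v = a[i]
--             out.append(v)
--             while i < n and a[i] == v:
--                 i += 1
--             while j < m and b[j] == v:
--                 j += 1
--     return out
-- ===== Notes on version B (the rewrite author's own statement) =====
-- stated objective: alternative
-- what changed: Replaces A's hash-set intersection (set(img_stems) & set(txt_stems), then sort) by a sort-then-merge algorithm: both stem lists are sorted first and a two-pointer merge scan emits each common stem once, skipping duplicate runs, so the sorted intersection is produced directly with no set data structure.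
import Mathlib
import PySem

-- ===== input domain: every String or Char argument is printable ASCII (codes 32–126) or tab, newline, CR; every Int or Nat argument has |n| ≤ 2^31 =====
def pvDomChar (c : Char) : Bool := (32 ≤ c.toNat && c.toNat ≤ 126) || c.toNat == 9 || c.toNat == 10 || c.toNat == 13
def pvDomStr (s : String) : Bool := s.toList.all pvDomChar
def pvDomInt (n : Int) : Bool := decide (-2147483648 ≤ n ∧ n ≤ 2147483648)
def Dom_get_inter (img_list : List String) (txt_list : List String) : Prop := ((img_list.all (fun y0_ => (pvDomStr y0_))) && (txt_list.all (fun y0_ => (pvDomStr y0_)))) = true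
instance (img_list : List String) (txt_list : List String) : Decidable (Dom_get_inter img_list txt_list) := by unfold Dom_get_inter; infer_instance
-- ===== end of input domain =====

-- B replaces A's hash-set intersection ("stem both lists, set & set, sort") by a sort-then-merge:
-- sort both stem lists, then a two-pointer merge scan emits each common stem once — an
-- alternative algorithm of similar cost, with no set data structure.


-- shared helper: s.split(".")[0][-8:].  split? with sep "." is always `some` of a nonempty
-- list, so the `getD []`/`headD ""` totalisations are never taken and the helper is exact.
def pyStem (s : String) : String :=
  PySem.Str.slice (((PySem.Str.split? s ".").getD []).headD "") (some (-8)) none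

-- ===== PORT A =====
def get_inter (img_list : List String) (txt_list : List String) : List String :=
  let img_stem := img_list.foldl (fun acc img => acc ++ [pyStem img]) []
  let txt_stem := txt_list.foldl (fun acc txt => acc ++ [pyStem txt]) []
  let sym := PySem.Set.inter (PySem.Set.ofList img_stem) (PySem.Set.ofList txt_stem)
  PySem.List.sorted sym (fun x => x) false

-- ===== PORT B =====
-- the two-pointer while loop of Source B: structural recursion on the two sorted lists;
-- the inner duplicate-skipping while loops are the dropWhile calls.
def pvMerge : List String → List String → List String
  | x :: xs, y :: ys =>
    if x < y then pvMerge xs (y :: ys)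
    else if y < x then pvMerge (x :: xs) ys
    else x :: pvMerge (xs.dropWhile (fun z => z == x)) (ys.dropWhile (fun z => z == x))
  | _, _ => []
termination_by a b => a.length + b.length
decreasing_by
  all_goals simp
  all_goals
    (have h1 := List.length_dropWhile_le (fun z => z == x) xs
     have h2 := List.length_dropWhile_le (fun z => z == x) ys
     omega)

def get_inter_alt (img_list : List String) (txt_list : List String) : List String :=
  let a := PySem.List.sorted (img_list.map pyStem) (fun x => x) false
  let b := PySem.List.sorted (txt_list.map pyStem) (fun x => x) false
  pvMerge a b

-- ===== PRECONDITION & SPEC =====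
def Spec_get_inter (img_list : List String) (txt_list : List String) (out : List String) : Prop := out = get_inter_alt img_list txt_list
instance (img_list : List String) (txt_list : List String) (out : List String) : Decidable (Spec_get_inter img_list txt_list out) := by unfold Spec_get_inter; infer_instance

-- ===== CLAIM (what is proved, stated in full; the proofs are below) =====
def Claim_equal_get_inter : Prop := ∀ (img_list : List String) (txt_list : List String), Dom_get_inter img_list txt_list → Spec_get_inter img_list txt_list (get_inter img_list txt_list)

-- ===== LEMMAS AND PROOFS =====

-- any element surviving dropWhile (== x) of a sorted list whose elements are all ≥ x is > x
theorem mem_dropWhile_gt (x : String) (xs : List String)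
    (hs : xs.Pairwise (· ≤ ·)) (hge : ∀ w ∈ xs, x ≤ w) :
    ∀ w ∈ xs.dropWhile (fun z => z == x), x < w := by
  induction xs with
  | nil => simp
  | cons h t ih =>
    intro w hw
    by_cases hx : h = x
    · subst hx
      rw [List.dropWhile_cons_of_pos (by simp)] at hw
      exact ih hs.tail
        (fun w hw => le_trans (hge _ (List.mem_cons_self))
          (List.rel_of_pairwise_cons hs hw)) w hw
    · rw [List.dropWhile_cons_of_neg (by simpa using hx)] at hw
      have hhx : x < h := lt_of_le_of_ne (hge h List.mem_cons_self) (Ne.symm hx)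
      rcases List.mem_cons.mp hw with rfl | hw
      · exact hhx
      · exact lt_of_lt_of_le hhx (List.rel_of_pairwise_cons hs hw)

theorem mem_of_mem_dropWhile {α : Type} (p : α → Bool) {xs : List α} {w : α}
    (h : w ∈ xs.dropWhile p) : w ∈ xs := by
  have := List.takeWhile_append_dropWhile (p := p) (l := xs)
  rw [← this]; exact List.mem_append_right _ h

theorem mem_dropWhile_of_ne (x : String) (xs : List String) (w : String)
    (hw : w ∈ xs) (hne : w ≠ x) : w ∈ xs.dropWhile (fun z => z == x) := by
  rw [← List.takeWhile_append_dropWhile (p := fun z => z == x) (l := xs)] at hw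
  rcases List.mem_append.mp hw with h | h
  · exact absurd (by simpa using List.mem_takeWhile_imp h) hne
  · exact h

-- membership in the merge of two sorted lists = membership in both
theorem mem_pvMerge (a b : List String)
    (ha : a.Pairwise (· ≤ ·)) (hb : b.Pairwise (· ≤ ·)) :
    ∀ z, z ∈ pvMerge a b ↔ z ∈ a ∧ z ∈ b := by
  fun_induction pvMerge a b with
  | case1 x xs y ys hxy ih =>
    intro z
    rw [ih ha.tail hb]
    constructor
    · rintro ⟨h1, h2⟩; exact ⟨List.mem_cons_of_mem _ h1, h2⟩
    · rintro ⟨h1, h2⟩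
      rcases List.mem_cons.mp h1 with rfl | h1
      · have : y ≤ z := by
          rcases List.mem_cons.mp h2 with rfl | h2
          · exact le_refl _
          · exact List.rel_of_pairwise_cons hb h2
        exact absurd hxy (not_lt_of_ge this)
      · exact ⟨h1, h2⟩
  | case2 x xs y ys hxy hyx ih =>
    intro z
    rw [ih ha hb.tail]
    constructor
    · rintro ⟨h1, h2⟩; exact ⟨h1, List.mem_cons_of_mem _ h2⟩
    · rintro ⟨h1, h2⟩
      rcases List.mem_cons.mp h2 with rfl | h2
      · have : x ≤ z := by
          rcases List.mem_cons.mp h1 with rfl | h1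
          · exact le_refl _
          · exact List.rel_of_pairwise_cons ha h1
        exact absurd hyx (not_lt_of_ge this)
      · exact ⟨h1, h2⟩
  | case3 x xs y ys hxy hyx ih =>
    have hxy' : x = y := le_antisymm (not_lt.mp hyx) (not_lt.mp hxy)
    subst hxy'
    intro z
    rw [List.mem_cons,
        ih (ha.tail.sublist (List.dropWhile_sublist _))
           (hb.tail.sublist (List.dropWhile_sublist _))]
    constructor
    · rintro (rfl | ⟨h1, h2⟩)
      · exact ⟨List.mem_cons_self, List.mem_cons_self⟩
      · exact ⟨List.mem_cons_of_mem _ (mem_of_mem_dropWhile _ h1),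
               List.mem_cons_of_mem _ (mem_of_mem_dropWhile _ h2)⟩
    · rintro ⟨h1, h2⟩
      by_cases hz : z = x
      · exact Or.inl hz
      · refine Or.inr ⟨?_, ?_⟩
        · rcases List.mem_cons.mp h1 with rfl | h1
          · exact absurd rfl hz
          · exact mem_dropWhile_of_ne x xs z h1 hz
        · rcases List.mem_cons.mp h2 with rfl | h2
          · exact absurd rfl hz
          · exact mem_dropWhile_of_ne x ys z h2 hz
  | case4 a b hne =>
    intro z
    constructor
    · intro h
      exact absurd h (by cases a <;> cases b <;> simp_all)
    · rintro ⟨ha', hb'⟩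
      cases a with
      | nil => simp at ha'
      | cons x xs => cases b with
        | nil => simp at hb'
        | cons y ys => exact (hne x xs y ys rfl rfl).elim

-- the merge of two sorted lists is strictly increasing
theorem pairwise_lt_pvMerge (a b : List String)
    (ha : a.Pairwise (· ≤ ·)) (hb : b.Pairwise (· ≤ ·)) :
    (pvMerge a b).Pairwise (· < ·) := by
  fun_induction pvMerge a b with
  | case1 x xs y ys hxy ih => exact ih ha.tail hb
  | case2 x xs y ys hxy hyx ih => exact ih ha hb.tail
  | case3 x xs y ys hxy hyx ih =>
    have hxy' : x = y := le_antisymm (not_lt.mp hyx) (not_lt.mp hxy)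
    subst hxy'
    have ha' := ha.tail.sublist (List.dropWhile_sublist (fun z => z == x) (l := xs))
    have hb' := hb.tail.sublist (List.dropWhile_sublist (fun z => z == x) (l := ys))
    refine List.Pairwise.cons ?_ (ih ha' hb')
    intro w hw
    have := (mem_pvMerge _ _ ha' hb' w).mp hw
    exact mem_dropWhile_gt x xs ha.tail (fun u hu => List.rel_of_pairwise_cons ha hu) w this.1
  | case4 a b hne =>
    cases a with
    | nil => simp
    | cons x xs => cases b with
      | nil => simp
      | cons y ys => exact (hne x xs y ys rfl rfl).elim

theorem foldl_append_map (xs : List String) (acc : List String) :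
    xs.foldl (fun acc s => acc ++ [pyStem s]) acc = acc ++ xs.map pyStem := by
  induction xs generalizing acc with
  | nil => simp
  | cons x xs ih => simp [List.foldl_cons, ih]

theorem get_inter_spec_aux (img_list : List String) (txt_list : List String) :
    get_inter img_list txt_list = get_inter_alt img_list txt_list := by
  unfold get_inter get_inter_alt
  simp only [foldl_append_map, List.nil_append]
  set A := img_list.map pyStem with hA
  set B := txt_list.map pyStem with hB
  have hsa : (PySem.List.sorted A (fun x => x) false).Pairwise (· ≤ ·) :=
    PySem.List.sorted_pairwise A (fun x => x)
  have hsb : (PySem.List.sorted B (fun x => x) false).Pairwise (· ≤ ·) :=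
    PySem.List.sorted_pairwise B (fun x => x)
  apply PySem.List.sorted_eq_of_perm_of_pairwise_lt
  · -- merge result is a permutation of the intersection set
    apply (List.perm_ext_iff_of_nodup
      ((pairwise_lt_pvMerge _ _ hsa hsb).imp ne_of_lt)
      (PySem.Set.nodup_inter _ _ (PySem.Set.nodup_ofList _))).mpr
    intro z
    rw [mem_pvMerge _ _ hsa hsb, PySem.List.mem_sorted, PySem.List.mem_sorted,
        PySem.Set.mem_inter, PySem.Set.mem_ofList, PySem.Set.mem_ofList]
  · exact pairwise_lt_pvMerge _ _ hsa hsb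

-- ===== VERDICT (by name: the statement is the Claim_ definition above) =====
theorem get_inter_spec : Claim_equal_get_inter := by
  intro img_list txt_list _
  exact get_inter_spec_aux img_list txt_list
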